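-- pv_equiv track=rewrite | github.com/PozziSan/computing-inspired-by-nature-exercises | Primeiro Trabalho - Algoritmos Genéticos/Terceiro Exercício/genetic_algorithm.py | reproduce_population
-- ===== SOURCE A (Python) =====
-- def reproduce_population(population, parents, offspring):
--     if offspring:
--         for parent in parents:
--             if parent in population:
--                 population.remove(parent)
--
--         for element in offspring:
--             population.append(element)
--
--     return population
-- ===== SOURCE B (Python) =====
-- def reproduce_population(population, parents, offspring):
--     if offspring:
--         remaining = list(parents)
--         kept = []
--         for x in population:
--             if x in remaining:
--                 remaining.remove(x)
--             else:
--                 kept.append(x)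
--         population[:] = kept + offspring
--     return population
-- ===== Notes on version B (the rewrite author's own statement) =====
-- stated objective: alternative
-- what changed: Instead of repeatedly searching and removing parents from the population (one pass over population per parent), B makes one forward pass over the population consuming a pool of parents, then rebuilds the list as kept + offspring via slice assignment (same in-place mutation).
import Mathlib
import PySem

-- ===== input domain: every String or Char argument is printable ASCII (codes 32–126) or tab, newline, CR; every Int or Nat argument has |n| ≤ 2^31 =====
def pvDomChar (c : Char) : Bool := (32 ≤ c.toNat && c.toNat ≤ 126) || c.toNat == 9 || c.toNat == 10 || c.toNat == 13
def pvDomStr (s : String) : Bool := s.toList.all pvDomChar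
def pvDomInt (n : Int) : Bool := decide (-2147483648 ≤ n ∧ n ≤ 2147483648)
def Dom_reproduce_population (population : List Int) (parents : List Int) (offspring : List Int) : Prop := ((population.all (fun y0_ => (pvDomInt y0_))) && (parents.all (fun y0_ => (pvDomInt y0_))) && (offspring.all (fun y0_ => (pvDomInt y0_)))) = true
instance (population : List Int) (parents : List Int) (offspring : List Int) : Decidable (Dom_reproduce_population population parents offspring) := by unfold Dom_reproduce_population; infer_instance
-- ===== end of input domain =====

-- B rebuilds the list in one forward pass over population consuming a pool of parents,
-- instead of A's pass over parents with repeated search-and-remove in population (alternative decomposition).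
-- A and B both mutate `population` in place; the equivalence proved here is about the RETURN value
-- (the Python in-place mutation is the same as the return value in both, checked by test).

-- ===== PORT A =====
-- first-occurrence removal, as Python's list.remove (A only calls it when the element is present)
def removeFirst (x : Int) : List Int → List Int
  | [] => []
  | y :: t => if y = x then t else y :: removeFirst x t

def reproduce_population (population : List Int) (parents : List Int) (offspring : List Int) : List Int :=
  if offspring ≠ [] then
    let pop := parents.foldl (fun acc p => if p ∈ acc then removeFirst p acc else acc) population
    offspring.foldl (fun acc e => acc ++ [e]) pop
  else population

-- ===== PORT B =====
def reproduce_population_alt (population : List Int) (parents : List Int) (offspring : List Int) : List Int :=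
  if offspring ≠ [] then
    let st := population.foldl
      (fun (st : List Int × List Int) x =>
        if x ∈ st.2 then (st.1, removeFirst x st.2) else (st.1 ++ [x], st.2))
      ([], parents)
    st.1 ++ offspring
  else population

-- ===== PRECONDITION & SPEC =====
def Spec_reproduce_population (population : List Int) (parents : List Int) (offspring : List Int) (out : List Int) : Prop := out = reproduce_population_alt population parents offspring
instance (population : List Int) (parents : List Int) (offspring : List Int) (out : List Int) : Decidable (Spec_reproduce_population population parents offspring out) := by unfold Spec_reproduce_population; infer_instance

-- ===== CLAIM (what is proved, stated in full; the proofs are below) =====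
def Claim_equal_reproduce_population : Prop := ∀ (population : List Int) (parents : List Int) (offspring : List Int), Dom_reproduce_population population parents offspring → Spec_reproduce_population population parents offspring (reproduce_population population parents offspring)

-- ===== LEMMAS AND PROOFS =====

-- A's parent-removal loop, named for the proofs
def remA (ps pop : List Int) : List Int :=
  ps.foldl (fun acc p => if p ∈ acc then removeFirst p acc else acc) pop

-- B's loop without the accumulator
def recB : List Int → List Int → List Int
  | [], _ => []
  | x :: t, ps => if x ∈ ps then recB t (removeFirst x ps) else x :: recB t ps

theorem remA_nil (ps : List Int) : remA ps [] = [] := by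
  induction ps with
  | nil => rfl
  | cons p t ih => simpa [remA, List.foldl] using ih

theorem remA_cons (x : Int) : ∀ (ps pop : List Int),
    remA ps (x :: pop) = if x ∈ ps then remA (removeFirst x ps) pop else x :: remA ps pop := by
  intro ps
  induction ps with
  | nil => intro pop; simp [remA]
  | cons p t ih =>
    intro pop
    by_cases hxp : p = x
    · subst hxp
      have h1 : remA (p :: t) (p :: pop) = remA t pop := by
        simp [remA, List.foldl, removeFirst]
      rw [h1]; simp [removeFirst]
    · have hxp' : x ≠ p := Ne.symm hxp
      have hstep : remA (p :: t) (x :: pop) =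
          remA t (x :: (if p ∈ pop then removeFirst p pop else pop)) := by
        by_cases hp : p ∈ pop <;>
          simp [remA, List.foldl, hp, hxp, removeFirst, hxp']
      have hrf : removeFirst x (p :: t) = p :: removeFirst x t := by
        simp [removeFirst, hxp]
      have hR1 : remA (p :: t) pop =
          remA t (if p ∈ pop then removeFirst p pop else pop) := by
        by_cases hp : p ∈ pop <;> simp [remA, List.foldl, hp]
      have hR2 : remA (p :: removeFirst x t) pop =
          remA (removeFirst x t) (if p ∈ pop then removeFirst p pop else pop) := by
        by_cases hp : p ∈ pop <;> simp [remA, List.foldl, hp]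
      by_cases hx : x ∈ t
      · have hmem : x ∈ p :: t := List.mem_cons_of_mem _ hx
        rw [hstep, ih, if_pos hx, if_pos hmem, hrf, hR2]
      · have hmem : x ∉ p :: t := by simp [List.mem_cons, hxp', hx]
        rw [hstep, ih, if_neg hx, if_neg hmem, hR1]

theorem remA_eq_recB (pop : List Int) : ∀ ps, remA ps pop = recB pop ps := by
  induction pop with
  | nil => intro ps; simp [remA_nil, recB]
  | cons x t ih =>
    intro ps
    rw [remA_cons x]
    by_cases hx : x ∈ ps <;> simp [recB, hx, ih]

theorem foldlB (pop : List Int) : ∀ (acc ps : List Int),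
    (pop.foldl
      (fun (st : List Int × List Int) x =>
        if x ∈ st.2 then (st.1, removeFirst x st.2) else (st.1 ++ [x], st.2))
      (acc, ps)).1 = acc ++ recB pop ps := by
  induction pop with
  | nil => intro acc ps; simp [recB]
  | cons x t ih =>
    intro acc ps
    by_cases hx : x ∈ ps <;> simp [List.foldl, recB, hx, ih]

theorem foldl_append (off : List Int) : ∀ pop : List Int,
    off.foldl (fun acc e => acc ++ [e]) pop = pop ++ off := by
  induction off with
  | nil => intro pop; simp
  | cons e t ih => intro pop; simp [List.foldl, ih]

-- ===== VERDICT (by name: the statement is the Claim_ definition above) =====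
theorem reproduce_population_spec : Claim_equal_reproduce_population := by
  intro population parents offspring _
  unfold Spec_reproduce_population reproduce_population reproduce_population_alt
  by_cases h : offspring = []
  · simp [h]
  · simp only [h, ne_eq, not_false_eq_true, if_pos]
    rw [foldl_append, foldlB, List.nil_append, ← remA_eq_recB]
    rfl
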